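-- pv_equiv track=rewrite | github.com/serpentk/adventofcode22025 | day5/day5_2.py | add_interval_to_disjoint_set
-- ===== SOURCE A (Python) =====
-- def add_interval_to_disjoint_set(new_interval, interval_set):
--     result = []
--     current_start, current_end = new_interval[0], new_interval[1]
--
--     for interval in interval_set:
--         if current_end < interval[0]: # New interval is before current interval, no overlap
--             result.append([current_start, current_end])
--             current_start, current_end = interval[0], interval[1] # Process current interval as a new one
--         elif current_start > interval[1]: # New interval is after current interval, no overlap
--             result.append(interval)
--         else: # Overlap, merge intervals
--             current_start = min(current_start, interval[0])
--             current_end = max(current_end, interval[1])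
--
--     result.append([current_start, current_end])
--     return sorted(result) # Return sorted merged intervals
-- ===== SOURCE B (Python) =====
-- def add_interval_to_disjoint_set(new_interval, interval_set):
--     # Keeps `out` sorted at all times (Python's lexicographic list order) by
--     # inserting every emitted interval at its position during the single scan,
--     # so the final sorting pass disappears.
--     def insert_sorted(xs, iv):
--         i = 0
--         while i < len(xs) and not iv < xs[i]:
--             i += 1
--         xs.insert(i, iv)
--
--     lo, hi = new_interval[0], new_interval[1]
--     out = []
--     for interval in interval_set:
--         a, b = interval[0], interval[1]
--         if hi < a:            # emit the running interval, adopt this one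
--             insert_sorted(out, [lo, hi])
--             lo, hi = a, b
--         elif lo > b:          # disjoint, emit as-is
--             insert_sorted(out, interval)
--         else:                 # overlap, widen the running interval
--             if a < lo:
--                 lo = a
--             if b > hi:
--                 hi = b
--     insert_sorted(out, [lo, hi])
--     return out
-- ===== Notes on version B (the rewrite author's own statement) =====
-- stated objective: alternative
-- what changed: B maintains the output list sorted throughout, inserting each emitted interval at its sorted position during the single scan, so the final sorted() pass of A disappears; the merge state is widened with explicit comparisons instead of min/max.
import Mathlib
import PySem

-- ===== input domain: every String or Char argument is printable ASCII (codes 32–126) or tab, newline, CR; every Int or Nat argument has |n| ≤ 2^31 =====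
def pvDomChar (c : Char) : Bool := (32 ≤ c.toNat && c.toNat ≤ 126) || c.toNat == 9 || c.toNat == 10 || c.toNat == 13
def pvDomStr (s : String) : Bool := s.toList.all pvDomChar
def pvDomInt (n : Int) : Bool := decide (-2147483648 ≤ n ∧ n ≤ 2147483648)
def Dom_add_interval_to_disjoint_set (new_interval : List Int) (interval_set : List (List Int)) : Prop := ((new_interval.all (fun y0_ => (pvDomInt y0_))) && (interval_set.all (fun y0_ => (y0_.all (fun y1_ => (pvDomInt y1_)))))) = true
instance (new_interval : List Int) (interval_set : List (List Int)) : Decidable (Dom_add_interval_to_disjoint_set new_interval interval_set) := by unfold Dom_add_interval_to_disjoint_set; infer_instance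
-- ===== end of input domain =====

-- B keeps the result sorted by inserting each emitted interval in place during the one scan,
-- dropping A's final sorted() pass (alternative structure, not claimed faster).


-- ===== PORT A =====
-- A's for-loop over interval_set with state (result, current_start, current_end);
-- `none` = IndexError (an interval shorter than 2), excluded by Pre_.
def pvALoop (result : List (List Int)) (cs ce : Int) : List (List Int) → Option (List (List Int))
  | [] => some (PySem.List.sorted (result ++ [[cs, ce]]) (fun x => x) false)
  | iv :: rest =>
    match PySem.List.pyGet? iv 0 with
    | none => none
    | some a =>
      if ce < a then
        match PySem.List.pyGet? iv 1 with
        | none => none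
        | some b => pvALoop (result ++ [[cs, ce]]) a b rest
      else
        match PySem.List.pyGet? iv 1 with
        | none => none
        | some b =>
          if cs > b then pvALoop (result ++ [iv]) cs ce rest
          else pvALoop result (min cs a) (max ce b) rest

def add_interval_to_disjoint_set (new_interval : List Int) (interval_set : List (List Int)) : List (List Int) :=
  match PySem.List.pyGet? new_interval 0, PySem.List.pyGet? new_interval 1 with
  | some cs, some ce => (pvALoop [] cs ce interval_set).getD []
  | _, _ => []  -- Python raises IndexError here; excluded by Pre_

-- ===== PORT B =====
-- Source B's insert_sorted: linear scan for the first strictly greater element, insert before it.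
def pvInsSorted (iv : List Int) : List (List Int) → List (List Int)
  | [] => [iv]
  | x :: xs => if iv < x then iv :: x :: xs else x :: pvInsSorted iv xs

-- Source B's for-loop with state (out, lo, hi); out is kept sorted; `none` = IndexError.
def pvBLoop (out : List (List Int)) (lo hi : Int) : List (List Int) → Option (List (List Int))
  | [] => some (pvInsSorted [lo, hi] out)
  | iv :: rest =>
    match PySem.List.pyGet? iv 0 with
    | none => none
    | some a =>
      match PySem.List.pyGet? iv 1 with
      | none => none
      | some b =>
        if hi < a then pvBLoop (pvInsSorted [lo, hi] out) a b rest
        else if lo > b then pvBLoop (pvInsSorted iv out) lo hi rest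
        else pvBLoop out (if a < lo then a else lo) (if b > hi then b else hi) rest

def add_interval_to_disjoint_set_alt (new_interval : List Int) (interval_set : List (List Int)) : List (List Int) :=
  match PySem.List.pyGet? new_interval 0 with
  | none => []  -- Python raises IndexError here; excluded by Pre_
  | some lo =>
    match PySem.List.pyGet? new_interval 1 with
    | none => []  -- Python raises IndexError here; excluded by Pre_
    | some hi => (pvBLoop [] lo hi interval_set).getD []

-- ===== PRECONDITION & SPEC =====
-- Exactly where A returns: new_interval and every interval need indices 0 and 1 (else IndexError).
def Pre_add_interval_to_disjoint_set (new_interval : List Int) (interval_set : List (List Int)) : Prop :=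
  2 ≤ new_interval.length ∧ ∀ iv ∈ interval_set, 2 ≤ iv.length
instance (new_interval : List Int) (interval_set : List (List Int)) : Decidable (Pre_add_interval_to_disjoint_set new_interval interval_set) := by unfold Pre_add_interval_to_disjoint_set; infer_instance

def pvWitness_add_interval_to_disjoint_set : List Int × List (List Int) := ([0, 5], [[1, 2], [7, 9]])

def Spec_add_interval_to_disjoint_set (new_interval : List Int) (interval_set : List (List Int)) (out : List (List Int)) : Prop := out = add_interval_to_disjoint_set_alt new_interval interval_set
instance (new_interval : List Int) (interval_set : List (List Int)) (out : List (List Int)) : Decidable (Spec_add_interval_to_disjoint_set new_interval interval_set out) := by unfold Spec_add_interval_to_disjoint_set; infer_instance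

-- ===== CLAIM (what is proved, stated in full; the proofs are below) =====
def Claim_equal_add_interval_to_disjoint_set : Prop := ∀ (new_interval : List Int) (interval_set : List (List Int)), Dom_add_interval_to_disjoint_set new_interval interval_set → Pre_add_interval_to_disjoint_set new_interval interval_set → Spec_add_interval_to_disjoint_set new_interval interval_set (add_interval_to_disjoint_set new_interval interval_set)

-- ===== LEMMAS AND PROOFS =====

-- The common stream of emitted intervals (proof-only abstraction of both loops).
def pvEmit (cs ce : Int) : List (List Int) → List (List Int)
  | [] => [[cs, ce]]
  | (a :: b :: t) :: rest =>
      if ce < a then [cs, ce] :: pvEmit a b rest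
      else if cs > b then (a :: b :: t) :: pvEmit cs ce rest
      else pvEmit (min cs a) (max ce b) rest
  | _ :: rest => pvEmit cs ce rest  -- unreachable under Pre_


lemma pvPyGet0 (x y : Int) (t : List Int) : PySem.List.pyGet? (x :: y :: t) 0 = some x := by
  have h : (0 : Int) ≤ (t.length : Int) + 1 := by positivity
  simp [PySem.List.pyGet?, PySem.List.pyIdx?, h]

lemma pvPyGet1 (x y : Int) (t : List Int) : PySem.List.pyGet? (x :: y :: t) 1 = some y := by
  have h : (1 : Int) ≤ (t.length : Int) + 1 := by omega
  simp [PySem.List.pyGet?, PySem.List.pyIdx?, h]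

lemma pvALoop_emit : ∀ (is : List (List Int)) (res : List (List Int)) (cs ce : Int),
    (∀ iv ∈ is, 2 ≤ iv.length) →
    pvALoop res cs ce is = some (PySem.List.sorted (res ++ pvEmit cs ce is) (fun x => x) false) := by
  intro is
  induction is with
  | nil => intro res cs ce _; rfl
  | cons iv rest ih =>
    intro res cs ce h
    obtain ⟨a, b, t, rfl⟩ : ∃ a b t, iv = a :: b :: t := by
      have := h iv (by simp)
      match iv with
      | a :: b :: t => exact ⟨a, b, t, rfl⟩
    have hrest : ∀ x ∈ rest, 2 ≤ x.length := fun x hx => h x (by simp [hx])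
    by_cases h1 : ce < a
    · simp [pvALoop, pvEmit, h1,
        ih (res ++ [[cs, ce]]) a b hrest, List.append_assoc]
    · by_cases h2 : cs > b
      · simp [pvALoop, pvEmit, h1, h2,
          ih (res ++ [a :: b :: t]) cs ce hrest, List.append_assoc]
      · simp [pvALoop, pvEmit, h1, h2,
          ih res (min cs a) (max ce b) hrest]

lemma pvInsSorted_perm (iv : List Int) : ∀ xs, (pvInsSorted iv xs).Perm (iv :: xs) := by
  intro xs
  induction xs with
  | nil => rfl
  | cons x xs ih =>
    by_cases h : iv < x
    · simp [pvInsSorted, h]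
    · simpa [pvInsSorted, h] using ((ih.cons x).trans (List.Perm.swap iv x xs))

lemma pvInsSorted_pairwise (iv : List Int) : ∀ xs, xs.Pairwise (· ≤ ·) →
    (pvInsSorted iv xs).Pairwise (· ≤ ·) := by
  intro xs
  induction xs with
  | nil => intro _; simp [pvInsSorted]
  | cons x xs ih =>
    intro hp
    rw [List.pairwise_cons] at hp
    by_cases h : iv < x
    · rw [pvInsSorted]
      simp only [if_pos h]
      refine List.Pairwise.cons ?_ (List.Pairwise.cons hp.1 hp.2)
      intro y hy
      rcases hy with _ | hy
      · exact le_of_lt h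
      · exact le_trans (le_of_lt h) (hp.1 _ (by assumption))
    · rw [pvInsSorted]
      simp only [if_neg h]
      refine List.Pairwise.cons ?_ (ih hp.2)
      intro y hy
      rcases List.mem_cons.mp ((pvInsSorted_perm iv xs).mem_iff.mp hy) with rfl | hy'
      · exact not_lt.mp h
      · exact hp.1 _ hy'

lemma pvBLoop_spec : ∀ (is : List (List Int)) (out : List (List Int)) (lo hi : Int),
    (∀ iv ∈ is, 2 ≤ iv.length) → out.Pairwise (· ≤ ·) →
    ∃ ys, pvBLoop out lo hi is = some ys ∧ ys.Perm (out ++ pvEmit lo hi is) ∧ ys.Pairwise (· ≤ ·) := by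
  intro is
  induction is with
  | nil =>
    intro out lo hi _ hp
    refine ⟨pvInsSorted [lo, hi] out, rfl, ?_, pvInsSorted_pairwise _ _ hp⟩
    have h1 := pvInsSorted_perm ([lo, hi]) out
    have h2 : (([lo, hi] : List Int) :: out).Perm (out ++ [[lo, hi]]) :=
      (List.perm_append_singleton _ _).symm
    simpa [pvEmit] using h1.trans h2
  | cons iv rest ih =>
    intro out lo hi h hp
    obtain ⟨a, b, t, rfl⟩ : ∃ a b t, iv = a :: b :: t := by
      have := h iv (by simp)
      match iv with
      | a :: b :: t => exact ⟨a, b, t, rfl⟩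
    have hrest : ∀ x ∈ rest, 2 ≤ x.length := fun x hx => h x (by simp [hx])
    by_cases h1 : hi < a
    · obtain ⟨ys, he, hperm, hpw⟩ :=
        ih (pvInsSorted [lo, hi] out) a b hrest (pvInsSorted_pairwise _ _ hp)
      refine ⟨ys, ?_, ?_, hpw⟩
      · simpa [pvBLoop, pvPyGet0, pvPyGet1, h1] using he
      · refine hperm.trans ?_
        rw [pvEmit]
        simp only [if_pos h1]
        exact (((pvInsSorted_perm _ _).append_right _).trans
          (List.perm_middle (a := ([lo, hi] : List Int)) (l₁ := out)
            (l₂ := pvEmit a b rest)).symm).symm.symm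
    · by_cases h2 : lo > b
      · obtain ⟨ys, he, hperm, hpw⟩ :=
          ih (pvInsSorted (a :: b :: t) out) lo hi hrest (pvInsSorted_pairwise _ _ hp)
        refine ⟨ys, ?_, ?_, hpw⟩
        · simpa [pvBLoop, pvPyGet0, pvPyGet1, h1, h2] using he
        · refine hperm.trans ?_
          rw [pvEmit]
          simp only [if_neg h1, if_pos h2]
          exact ((pvInsSorted_perm _ _).append_right _).trans
            (List.perm_middle (a := (a :: b :: t : List Int)) (l₁ := out)
              (l₂ := pvEmit lo hi rest)).symm
      · obtain ⟨ys, he, hperm, hpw⟩ := ih out (min lo a) (max hi b) hrest hp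
        refine ⟨ys, ?_, ?_, hpw⟩
        · have hmin : (if a < lo then a else lo) = min lo a := by
            rcases lt_or_ge a lo with hc | hc <;> simp [min_def] <;> omega
          have hmax : (if b > hi then b else hi) = max hi b := by
            rcases lt_or_ge hi b with hc | hc <;> simp [max_def] <;> omega
          simpa [pvBLoop, pvPyGet0, pvPyGet1, h1, h2, hmin, hmax] using he
        · refine hperm.trans ?_
          rw [pvEmit]
          simp [h1, h2]

-- ===== VERDICT (by name: the statement is the Claim_ definition above) =====
theorem add_interval_to_disjoint_set_spec : Claim_equal_add_interval_to_disjoint_set := by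
  intro ni is _ hpre
  obtain ⟨hlen, hivs⟩ := hpre
  obtain ⟨c0, c1, t, rfl⟩ : ∃ c0 c1 t, ni = c0 :: c1 :: t := by
    match ni with
    | c0 :: c1 :: t => exact ⟨c0, c1, t, rfl⟩
  obtain ⟨ys, he, hperm, hpw⟩ := pvBLoop_spec is [] c0 c1 hivs (by simp)
  have hA := pvALoop_emit is [] c0 c1 hivs
  unfold Spec_add_interval_to_disjoint_set add_interval_to_disjoint_set add_interval_to_disjoint_set_alt
  rw [pvPyGet0, pvPyGet1]
  show (pvALoop [] c0 c1 is).getD [] = (pvBLoop [] c0 c1 is).getD []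
  rw [hA, he]
  have hs := PySem.List.sorted_id_eq_of_perm_of_pairwise (pvEmit c0 c1 is) ys (by simpa using hperm) hpw
  have hd : (fun (a b : List Int) => a.decidableLT b) = (LinearOrder.toDecidableLT : DecidableLT (List Int)) := by
    funext a b; exact Subsingleton.elim _ _
  simp only [Option.getD_some, List.nil_append]
  rw [hd]
  exact hs
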